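-- pv_equiv track=rewrite | github.com/gknoy/aoc | aoc_2022/days/day08.py | calc_visibility_row
-- ===== SOURCE A (Python) =====
-- from typing import Callable, List
--
-- VisRow = List[bool]
--
-- GridRow = List[int]
--
-- def calc_visibility_row(grid_row: GridRow) -> VisRow:
--     n_cols = len(grid_row)
--     vis = [False for _ in range(n_cols)]
--     # leftmost + rightmost are definitely visible
--     vis[0] = True
--     vis[-1] = True
--     # scan from left and right at same time
--     tallest_from_west = grid_row[0]
--     tallest_from_east = grid_row[-1]
--     west_index = 0
--     east_index = n_cols - 1
--     tallest_west_index = west_index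
--     tallest_east_index = east_index
--     while west_index <= tallest_east_index and east_index >= tallest_west_index:
--         if grid_row[west_index] > tallest_from_west:
--             vis[west_index] = True
--             tallest_from_west = grid_row[west_index]
--             tallest_west_index = west_index
--         if grid_row[east_index] > tallest_from_east:
--             vis[east_index] = True
--             tallest_from_east = grid_row[east_index]
--             tallest_east_index = east_index
--         west_index += 1
--         east_index -= 1
--     return vis
-- ===== SOURCE B (Python) =====
-- def calc_visibility_row(grid_row):
--     n = len(grid_row)
--     vis = [False] * n
--     vis[0] = True
--     vis[-1] = True
--     tallest = grid_row[0]
--     for i in range(1, n):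
--         if grid_row[i] > tallest:
--             vis[i] = True
--             tallest = grid_row[i]
--     tallest = grid_row[-1]
--     for i in range(n - 2, -1, -1):
--         if grid_row[i] > tallest:
--             vis[i] = True
--             tallest = grid_row[i]
--     return vis
-- ===== Notes on version B (the rewrite author's own statement) =====
-- stated objective: simpler
-- what changed: Replaces A's single bidirectional two-pointer loop (with its tallest-index termination condition) by two plain sequential running-max passes, left-to-right then right-to-left; Pre_ excludes only the empty list, on which both raise IndexError.
-- intended difference: On rows where some interior tree strictly taller than everything on one of its sides lies beyond the iteration at which A's bidirectional scan terminates, A leaves that tree marked False (e.g. [0,0,1,2,2] -> [True,False,True,False,True]) while B marks it True ([True,False,True,True,True]); such a tree is visible from that edge, so B's value is the intended one. — e.g. on calc_visibility_row([0, 0, 1, 2, 2]): A returns [true, false, true, false, true], B returns [true, false, true, true, true]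
import Mathlib
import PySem

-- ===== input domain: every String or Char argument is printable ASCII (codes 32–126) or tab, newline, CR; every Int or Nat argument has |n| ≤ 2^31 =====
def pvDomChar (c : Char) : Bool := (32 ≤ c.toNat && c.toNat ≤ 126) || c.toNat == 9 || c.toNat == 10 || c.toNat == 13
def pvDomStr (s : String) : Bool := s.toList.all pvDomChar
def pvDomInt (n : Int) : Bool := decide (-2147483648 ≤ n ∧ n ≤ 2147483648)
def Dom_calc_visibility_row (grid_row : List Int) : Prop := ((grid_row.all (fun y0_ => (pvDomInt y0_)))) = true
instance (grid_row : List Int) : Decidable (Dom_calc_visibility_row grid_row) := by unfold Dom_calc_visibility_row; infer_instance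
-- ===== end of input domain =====

-- B replaces A's bidirectional two-pointer loop by two plain sequential running-max
-- passes (objective: simpler); on rows where A's early termination skips a visible
-- tree, B marks it (intended difference, stated in D_ below).

-- ===== PORT A =====
-- the while-loop of A, step for step; fuel only makes the recursion structural
def pvLoopA (g : List Int) : Nat → List Bool → Int → Int → Int → Int → Int → Int → List Bool
  | 0, vis, _, _, _, _, _, _ => vis
  | fuel+1, vis, tw, te, wi, ei, twi, tei =>
    if wi ≤ tei ∧ ei ≥ twi then
      let gw := PySem.List.pyGetD g wi 0
      let vis1 := if gw > tw then PySem.List.pySetD vis wi true else vis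
      let tw1 := if gw > tw then gw else tw
      let twi1 := if gw > tw then wi else twi
      let ge := PySem.List.pyGetD g ei 0
      let vis2 := if ge > te then PySem.List.pySetD vis1 ei true else vis1
      let te1 := if ge > te then ge else te
      let tei1 := if ge > te then ei else tei
      pvLoopA g fuel vis2 tw1 te1 (wi + 1) (ei - 1) twi1 tei1
    else vis

def calc_visibility_row (grid_row : List Int) : List Bool :=
  let n_cols : Int := grid_row.length
  let vis : List Bool := (List.range grid_row.length).map (fun _ => false)
  let vis := PySem.List.pySetD vis 0 true
  let vis := PySem.List.pySetD vis (-1) true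
  let tw := PySem.List.pyGetD grid_row 0 0
  let te := PySem.List.pyGetD grid_row (-1) 0
  pvLoopA grid_row (grid_row.length + 1) vis tw te 0 (n_cols - 1) 0 (n_cols - 1)

-- ===== PORT B =====
-- body of B's west pass: if grid_row[i] > tallest: vis[i] = True; tallest = grid_row[i]
def pvStepW (g : List Int) (s : List Bool × Int) (i : Int) : List Bool × Int :=
  let x := PySem.List.pyGetD g i 0
  if x > s.2 then (PySem.List.pySetD s.1 i true, x) else s

-- body of B's east pass (same statements, written out as in Source B's second loop)
def pvStepE (g : List Int) (s : List Bool × Int) (i : Int) : List Bool × Int :=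
  let x := PySem.List.pyGetD g i 0
  if x > s.2 then (PySem.List.pySetD s.1 i true, x) else s

def calc_visibility_row_alt (grid_row : List Int) : List Bool :=
  let n : Int := grid_row.length
  let vis : List Bool := List.replicate grid_row.length false
  let vis := PySem.List.pySetD vis 0 true
  let vis := PySem.List.pySetD vis (-1) true
  -- for i in range(1, n): …
  let s1 := (PySem.List.pyRange 1 n 1).foldl (pvStepW grid_row)
    (vis, PySem.List.pyGetD grid_row 0 0)
  -- for i in range(n - 2, -1, -1): …
  let s2 := (PySem.List.pyRange (n - 2) (-1) (-1)).foldl (pvStepE grid_row)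
    (s1.1, PySem.List.pyGetD grid_row (-1) 0)
  s2.1

-- ===== PRECONDITION & SPEC =====
-- input-shape helpers for D_ (they read the grid only; neither port is referenced):
-- pvW i: tree i is strictly taller than every tree west of it; pvE i: ditto east.
def pvW (g : List Int) (i : Nat) : Prop := ∀ x ∈ g.take i, x < g.getD i 0
def pvE (g : List Int) (i : Nat) : Prop := ∀ x ∈ g.drop (i+1), x < g.getD i 0

-- Pre_ excludes only the empty list, on which Python A raises IndexError (vis[0] = True);
-- B raises there too.
def Pre_calc_visibility_row (grid_row : List Int) : Prop := grid_row ≠ []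
instance (grid_row : List Int) : Decidable (Pre_calc_visibility_row grid_row) := by
  unfold Pre_calc_visibility_row; infer_instance

def pvWitness_calc_visibility_row : List Int := [1, 2]

-- On rows where some interior tree strictly taller than everything on one of its sides lies
-- beyond the iteration at which A's bidirectional scan terminates, A leaves that visible tree
-- False (e.g. [0,0,1,2,2] → [T,F,T,F,T]) while B marks it True ([T,F,T,T,T]); such a tree is
-- visible from that edge, so B's value is the intended one.
def D_calc_visibility_row (grid_row : List Int) : Prop :=
  ∃ i < grid_row.length, (pvW grid_row i ∨ pvE grid_row i) ∧
    (pvW grid_row i → ∃ k < i, pvW grid_row k ∧ grid_row.length - i ≤ k) ∧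
    (pvE grid_row i → ∃ k < grid_row.length - 1 - i, pvE grid_row k ∧ i < k)
instance (grid_row : List Int) : Decidable (D_calc_visibility_row grid_row) := by
  unfold D_calc_visibility_row pvW pvE; infer_instance

def Spec_calc_visibility_row (grid_row : List Int) (out : List Bool) : Prop :=
  ¬ D_calc_visibility_row grid_row → out = calc_visibility_row_alt grid_row
instance (grid_row : List Int) (out : List Bool) : Decidable (Spec_calc_visibility_row grid_row out) := by unfold Spec_calc_visibility_row; infer_instance

def pvDiffWitness_calc_visibility_row : List Int := [0, 0, 1, 2, 2]
def pvDiffWitnessOut_calc_visibility_row : (List Bool) × (List Bool) :=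
  ([true, false, true, false, true], [true, false, true, true, true])

-- ===== CLAIM (what is proved, stated in full; the proofs are below) =====
def Claim_unchanged_calc_visibility_row : Prop := ∀ (grid_row : List Int), Dom_calc_visibility_row grid_row → Pre_calc_visibility_row grid_row → Spec_calc_visibility_row grid_row (calc_visibility_row grid_row)
def Claim_changed_calc_visibility_row : Prop := Dom_calc_visibility_row (pvDiffWitness_calc_visibility_row) ∧ Pre_calc_visibility_row (pvDiffWitness_calc_visibility_row) ∧ D_calc_visibility_row (pvDiffWitness_calc_visibility_row) ∧ calc_visibility_row (pvDiffWitness_calc_visibility_row) = pvDiffWitnessOut_calc_visibility_row.1 ∧ calc_visibility_row_alt (pvDiffWitness_calc_visibility_row) = pvDiffWitnessOut_calc_visibility_row.2 ∧ pvDiffWitnessOut_calc_visibility_row.1 ≠ pvDiffWitnessOut_calc_visibility_row.2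
def Claim_exact_calc_visibility_row : Prop := ∀ (grid_row : List Int), Dom_calc_visibility_row grid_row → Pre_calc_visibility_row grid_row → D_calc_visibility_row grid_row → calc_visibility_row grid_row ≠ calc_visibility_row_alt grid_row

-- ===== LEMMAS AND PROOFS =====

-- g[i] (in-range Nat index)
def pvGi (g : List Int) (i : Nat) : Int := g.getD i 0

-- tallest_from_west at the START of iteration k
def pvTw (g : List Int) : Nat → Int
  | 0 => pvGi g 0
  | k+1 => if pvGi g k > pvTw g k then pvGi g k else pvTw g k

-- tallest_west_index at the START of iteration k
def pvLw (g : List Int) : Nat → Nat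
  | 0 => 0
  | k+1 => if pvGi g k > pvTw g k then k else pvLw g k

-- tallest_from_east at the START of iteration k
def pvTe (g : List Int) : Nat → Int
  | 0 => pvGi g (g.length - 1)
  | k+1 => if pvGi g (g.length - 1 - k) > pvTe g k then pvGi g (g.length - 1 - k) else pvTe g k

-- tallest_east_index at the START of iteration k
def pvFe (g : List Int) : Nat → Nat
  | 0 => g.length - 1
  | k+1 => if pvGi g (g.length - 1 - k) > pvTe g k then g.length - 1 - k else pvFe g k

-- west / east record predicates
def pvWb (g : List Int) (i : Nat) : Bool := decide (i = 0) || decide (pvGi g i > pvTw g i)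
def pvEb (g : List Int) (i : Nat) : Bool :=
  decide (i = g.length - 1) || decide (pvGi g i > pvTe g (g.length - 1 - i))

-- the loop guard at the start of iteration k
def pvCb (g : List Int) (k : Nat) : Bool :=
  decide (k ≤ pvFe g k) && decide (pvLw g k + k + 1 ≤ g.length)

-- the vis list at the start of iteration k
def pvVisBit (g : List Int) (k i : Nat) : Bool :=
  decide (i = 0) || decide (i = g.length - 1) ||
  (pvWb g i && decide (1 ≤ i ∧ i < k)) ||
  (pvEb g i && decide (g.length - k ≤ i ∧ i + 1 < g.length))

def pvVisAt (g : List Int) (k : Nat) : List Bool := (List.range g.length).map (pvVisBit g k)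

-- the first k ≥ start at which the guard fails
def pvFirstFail (g : List Int) : Nat → Nat → Nat
  | 0, k => k
  | fuel+1, k => if pvCb g k then pvFirstFail g fuel (k+1) else k

def pvStop (g : List Int) : Nat := pvFirstFail g (g.length + 1) 0

lemma pvSetD_neg_one {α : Type} (xs : List α) (v : α) (h : xs ≠ []) :
    PySem.List.pySetD xs (-1) v = xs.set (xs.length - 1) v := by
  have h1 : 0 < xs.length := List.length_pos_iff.mpr h
  simp only [PySem.List.pySetD, PySem.List.pySet?, PySem.List.pyIdx?]
  rw [if_neg (by omega), if_pos (by omega)]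
  norm_num

lemma pvFe_le (g : List Int) (k : Nat) : pvFe g k ≤ g.length - 1 := by
  induction k with
  | zero => simp [pvFe]
  | succ k ih =>
    rw [show pvFe g (k+1) = if pvGi g (g.length - 1 - k) > pvTe g k then g.length - 1 - k
      else pvFe g k from rfl]
    split_ifs
    · omega
    · exact ih

lemma pvFe_ge (g : List Int) : ∀ k, g.length - (k+1) ≤ pvFe g (k+1) := by
  intro k
  induction k with
  | zero =>
    rw [show pvFe g 1 = if pvGi g (g.length - 1 - 0) > pvTe g 0 then g.length - 1 - 0
      else pvFe g 0 from rfl]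
    split_ifs
    · omega
    · rw [show pvFe g 0 = g.length - 1 from rfl]
  | succ k ih =>
    rw [show pvFe g (k+1+1) = if pvGi g (g.length - 1 - (k+1)) > pvTe g (k+1) then
      g.length - 1 - (k+1) else pvFe g (k+1) from rfl]
    split_ifs
    · omega
    · omega

lemma pvFe_rec (g : List Int) : ∀ k, k ≤ g.length → pvEb g (pvFe g k) = true := by
  intro k
  induction k with
  | zero => intro _; simp [pvFe, pvEb]
  | succ k ih =>
    intro hk
    rw [show pvFe g (k+1) = if pvGi g (g.length - 1 - k) > pvTe g k then g.length - 1 - k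
      else pvFe g k from rfl]
    split_ifs with h
    · have e : g.length - 1 - (g.length - 1 - k) = k := by omega
      simp [pvEb, e, h]
    · exact ih (by omega)

lemma pvFe_min (g : List Int) : ∀ k, k ≤ g.length →
    ∀ i, g.length - k ≤ i → i < g.length → pvEb g i = true → pvFe g k ≤ i := by
  intro k
  induction k with
  | zero => intro _ i h1 h2 _; omega
  | succ k ih =>
    intro hk i h1 h2 hEb
    rw [show pvFe g (k+1) = if pvGi g (g.length - 1 - k) > pvTe g k then g.length - 1 - k
      else pvFe g k from rfl]
    split_ifs with h
    · omega
    · by_cases hik : g.length - k ≤ i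
      · exact ih (by omega) i hik h2 hEb
      · have hie : i = g.length - 1 - k := by omega
        by_cases hk0 : k = 0
        · subst hk0
          rw [show pvFe g 0 = g.length - 1 from rfl]; omega
        · exfalso
          have e : g.length - 1 - i = k := by omega
          have hne : ¬ (i = g.length - 1) := by omega
          have hgt : pvGi g i > pvTe g k := by
            simp [pvEb, hne, e] at hEb; exact hEb
          rw [hie] at hgt
          exact h hgt

lemma pvLw_le (g : List Int) (k : Nat) : pvLw g k ≤ k - 1 := by
  induction k with
  | zero => simp [pvLw]
  | succ k ih =>
    rw [show pvLw g (k+1) = if pvGi g k > pvTw g k then k else pvLw g k from rfl]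
    split_ifs
    · omega
    · omega

lemma pvLw_rec (g : List Int) (k : Nat) : pvWb g (pvLw g k) = true := by
  induction k with
  | zero => simp [pvLw, pvWb]
  | succ k ih =>
    rw [show pvLw g (k+1) = if pvGi g k > pvTw g k then k else pvLw g k from rfl]
    split_ifs with h
    · simp [pvWb, h]
    · exact ih

lemma pvLw_ge (g : List Int) : ∀ k i, i < k → pvWb g i = true → i ≤ pvLw g k := by
  intro k
  induction k with
  | zero => intro i hi _; omega
  | succ k ih =>
    intro i hi hW
    have hle := pvLw_le g k
    rw [show pvLw g (k+1) = if pvGi g k > pvTw g k then k else pvLw g k from rfl]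
    split_ifs with h
    · omega
    · rcases (by omega : i < k ∨ i = k) with h' | h'
      · exact ih i h' hW
      · subst h'
        by_cases h0 : i = 0
        · omega
        · exfalso
          simp [pvWb, h0] at hW
          exact h hW

lemma pvCb_ge_false (g : List Int) (k : Nat) (hn : 1 ≤ g.length) (hk : g.length ≤ k) :
    pvCb g k = false := by
  have h := pvFe_le g k
  simp only [pvCb, Bool.and_eq_false_iff, decide_eq_false_iff_not]
  left; omega

-- guard failure in closed form: some record position i has i+1 ≤ k and n-i ≤ k
lemma pvNotC_iff (g : List Int) (k : Nat) (hn : 1 ≤ g.length) (hk : k ≤ g.length) :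
    pvCb g k = false ↔
      ∃ i, i < g.length ∧ (pvWb g i || pvEb g i) = true ∧ i + 1 ≤ k ∧ g.length - i ≤ k := by
  constructor
  · intro hF
    by_cases h1 : k ≤ pvFe g k
    · have h2 : g.length ≤ pvLw g k + k := by
        by_contra hc
        have : pvCb g k = true := by
          simp only [pvCb, Bool.and_eq_true, decide_eq_true_eq]
          exact ⟨h1, by omega⟩
        rw [this] at hF
        simp at hF
      have hlwle := pvLw_le g k
      have hk1 : 1 ≤ k := by
        by_contra h0
        have hk0 : k = 0 := by omega
        subst hk0
        have : pvLw g 0 = 0 := rfl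
        omega
      exact ⟨pvLw g k, by omega, by simp [pvLw_rec g k], by omega, by omega⟩
    · have hfele := pvFe_le g k
      have hk1 : 1 ≤ k := by omega
      have hge : g.length - k ≤ pvFe g k := by
        have := pvFe_ge g (k-1)
        rwa [Nat.sub_add_cancel hk1] at this
      exact ⟨pvFe g k, by omega, by simp [pvFe_rec g k hk], by omega, by omega⟩
  · rintro ⟨i, hi, hrec, h1, h2⟩
    rw [Bool.or_eq_true] at hrec
    rcases hrec with hw | he
    · have h3 := pvLw_ge g k i (by omega) hw
      simp only [pvCb, Bool.and_eq_false_iff, decide_eq_false_iff_not]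
      right; omega
    · have h3 := pvFe_min g k hk i (by omega) hi he
      simp only [pvCb, Bool.and_eq_false_iff, decide_eq_false_iff_not]
      left; omega

lemma pvFirstFail_min (g : List Int) : ∀ fuel k j, k ≤ j → j < pvFirstFail g fuel k →
    pvCb g j = true := by
  intro fuel
  induction fuel with
  | zero =>
    intro k j h1 h2
    rw [show pvFirstFail g 0 k = k from rfl] at h2
    omega
  | succ fuel ih =>
    intro k j h1 h2
    rw [show pvFirstFail g (fuel+1) k = if pvCb g k then pvFirstFail g fuel (k+1) else k from rfl] at h2
    by_cases hC : pvCb g k = true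
    · rw [if_pos hC] at h2
      rcases (by omega : j = k ∨ k + 1 ≤ j) with h | h
      · subst h; exact hC
      · exact ih (k+1) j h h2
    · rw [if_neg hC] at h2; omega

lemma pvFirstFail_false (g : List Int) : ∀ fuel k, pvCb g (k + fuel) = false →
    pvCb g (pvFirstFail g fuel k) = false := by
  intro fuel
  induction fuel with
  | zero => intro k h; simpa using h
  | succ fuel ih =>
    intro k h
    rw [show pvFirstFail g (fuel+1) k = if pvCb g k then pvFirstFail g fuel (k+1) else k from rfl]
    split_ifs with hC
    · apply ih (k+1)
      have e : k + 1 + fuel = k + (fuel + 1) := by omega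
      rw [e]; exact h
    · simpa using hC

lemma pvStop_false (g : List Int) (hn : 1 ≤ g.length) : pvCb g (pvStop g) = false := by
  unfold pvStop
  apply pvFirstFail_false
  simpa using pvCb_ge_false g (g.length + 1) hn (by omega)

lemma pvStop_min (g : List Int) : ∀ j, j < pvStop g → pvCb g j = true := by
  intro j hj
  unfold pvStop at hj
  exact pvFirstFail_min g (g.length + 1) 0 j (Nat.zero_le _) hj

lemma pvStop_le (g : List Int) (hn : 1 ≤ g.length) : pvStop g ≤ g.length := by
  by_contra hc
  push_neg at hc
  have h1 := pvStop_min g g.length hc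
  rw [pvCb_ge_false g g.length hn le_rfl] at h1
  simp at h1

lemma pvBit_succ_west (g : List Int) (k : Nat) (hW : pvGi g k > pvTw g k) :
    pvVisBit g (k+1) k = true := by
  rcases Nat.eq_zero_or_pos k with h0 | h0
  · subst h0; simp [pvVisBit]
  · simp [pvVisBit, pvWb, hW, show 1 ≤ k ∧ k < k + 1 from ⟨h0, by omega⟩]

lemma pvBit_succ_east (g : List Int) (k : Nat) (hn : 1 ≤ g.length) (hk : k < g.length)
    (hE : pvGi g (g.length - 1 - k) > pvTe g k) :
    pvVisBit g (k+1) (g.length - 1 - k) = true := by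
  rcases Nat.eq_zero_or_pos k with h0 | h0
  · subst h0; simp [pvVisBit]
  · have e1 : g.length - 1 - (g.length - 1 - k) = k := by omega
    simp [pvVisBit, pvEb, e1, hE,
      show g.length - (k+1) ≤ g.length - 1 - k ∧ (g.length - 1 - k) + 1 < g.length from
        ⟨by omega, by omega⟩]

lemma pvBit_succ_other (g : List Int) (k i : Nat) (hk : k < g.length) (h1 : i ≠ k)
    (h2 : i ≠ g.length - 1 - k) : pvVisBit g (k+1) i = pvVisBit g k i := by
  have cw : (1 ≤ i ∧ i < k+1) ↔ (1 ≤ i ∧ i < k) := by omega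
  have ce : (g.length - (k+1) ≤ i ∧ i + 1 < g.length) ↔ (g.length - k ≤ i ∧ i + 1 < g.length) := by
    omega
  simp only [pvVisBit, cw, ce]

lemma pvBit_succ_kW (g : List Int) (k : Nat) (hk : k < g.length)
    (hW : ¬ pvGi g k > pvTw g k) (h2 : k ≠ g.length - 1 - k) :
    pvVisBit g (k+1) k = pvVisBit g k k := by
  rcases Nat.eq_zero_or_pos k with h0 | h0
  · subst h0; simp [pvVisBit]
  · have hwb : pvWb g k = false := by
      simp [pvWb, hW, show k ≠ 0 from by omega]
    have ce : (g.length - (k+1) ≤ k ∧ k + 1 < g.length) ↔ (g.length - k ≤ k ∧ k + 1 < g.length) := by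
      omega
    simp only [pvVisBit, hwb, ce, Bool.false_and]

lemma pvBit_succ_eE (g : List Int) (k : Nat) (hn : 1 ≤ g.length) (hk : k < g.length)
    (hE : ¬ pvGi g (g.length - 1 - k) > pvTe g k) (h1 : g.length - 1 - k ≠ k) :
    pvVisBit g (k+1) (g.length - 1 - k) = pvVisBit g k (g.length - 1 - k) := by
  rcases Nat.eq_zero_or_pos k with h0 | h0
  · subst h0; simp [pvVisBit]
  · have e1 : g.length - 1 - (g.length - 1 - k) = k := by omega
    have heb : pvEb g (g.length - 1 - k) = false := by
      simp [pvEb, e1, hE, show g.length - 1 - k ≠ g.length - 1 from by omega]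
    have cw : (1 ≤ g.length - 1 - k ∧ g.length - 1 - k < k+1) ↔
        (1 ≤ g.length - 1 - k ∧ g.length - 1 - k < k) := by omega
    simp only [pvVisBit, heb, cw, Bool.false_and]

lemma pvBit_succ_mid (g : List Int) (k : Nat) (hn : 1 ≤ g.length) (hk : k < g.length)
    (hW : ¬ pvGi g k > pvTw g k) (hE : ¬ pvGi g (g.length - 1 - k) > pvTe g k)
    (hmid : k = g.length - 1 - k) : pvVisBit g (k+1) k = pvVisBit g k k := by
  rcases Nat.eq_zero_or_pos k with h0 | h0
  · subst h0; simp [pvVisBit]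
  · have hkn : k ≠ g.length - 1 := by omega
    have hwb : pvWb g k = false := by
      simp [pvWb, hW, show k ≠ 0 from by omega]
    have e1 : g.length - 1 - k = k := hmid.symm
    have hE' : ¬ pvGi g k > pvTe g k := by rwa [e1] at hE
    have heb : pvEb g k = false := by
      simp [pvEb, e1, hkn, hE']
    simp only [pvVisBit, hwb, heb, Bool.false_and]

lemma pvVisAt_step (g : List Int) (k : Nat) (hn : 1 ≤ g.length) (hk : k < g.length) :
    (if pvGi g (g.length - 1 - k) > pvTe g k
      then (if pvGi g k > pvTw g k then (pvVisAt g k).set k true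
        else pvVisAt g k).set (g.length - 1 - k) true
      else (if pvGi g k > pvTw g k then (pvVisAt g k).set k true else pvVisAt g k))
    = pvVisAt g (k+1) := by
  apply List.ext_getElem
  · split_ifs <;> simp [pvVisAt]
  · intro i h1 h2
    have hi : i < g.length := by simpa [pvVisAt] using h2
    split_ifs with hE hW hW
    · simp only [pvVisAt, List.getElem_set, List.getElem_map, List.getElem_range]
      by_cases hc2 : g.length - 1 - k = i
      · subst hc2
        rw [if_pos rfl]
        exact (pvBit_succ_east g k hn hk hE).symm
      · rw [if_neg hc2]
        by_cases hc1 : k = i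
        · subst hc1
          rw [if_pos rfl]
          exact (pvBit_succ_west g k hW).symm
        · rw [if_neg hc1]
          exact (pvBit_succ_other g k i hk (fun h => hc1 h.symm) (fun h => hc2 h.symm)).symm
    · simp only [pvVisAt, List.getElem_set, List.getElem_map, List.getElem_range]
      by_cases hc2 : g.length - 1 - k = i
      · subst hc2
        rw [if_pos rfl]
        exact (pvBit_succ_east g k hn hk hE).symm
      · rw [if_neg hc2]
        by_cases hc1 : i = k
        · subst hc1
          exact (pvBit_succ_kW g i hk hW (fun h => hc2 h.symm)).symm
        · exact (pvBit_succ_other g k i hk hc1 (fun h => hc2 h.symm)).symm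
    · simp only [pvVisAt, List.getElem_set, List.getElem_map, List.getElem_range]
      by_cases hc1 : k = i
      · subst hc1
        rw [if_pos rfl]
        exact (pvBit_succ_west g k hW).symm
      · rw [if_neg hc1]
        by_cases hc2 : i = g.length - 1 - k
        · subst hc2
          exact (pvBit_succ_eE g k hn hk hE (fun h => hc1 h.symm)).symm
        · exact (pvBit_succ_other g k i hk (fun h => hc1 h.symm) hc2).symm
    · simp only [pvVisAt, List.getElem_map, List.getElem_range]
      by_cases hc1 : i = k
      · subst hc1
        by_cases hc2 : i = g.length - 1 - i
        · exact (pvBit_succ_mid g i hn hk hW hE hc2).symm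
        · exact (pvBit_succ_kW g i hk hW hc2).symm
      · by_cases hc2 : i = g.length - 1 - k
        · subst hc2
          exact (pvBit_succ_eE g k hn hk hE hc1).symm
        · exact (pvBit_succ_other g k i hk hc1 hc2).symm

lemma pvLoop_eval (g : List Int) : ∀ (fuel k : Nat), 1 ≤ g.length → k + fuel = g.length + 1 →
    pvLoopA g fuel (pvVisAt g k) (pvTw g k) (pvTe g k) (k : Int)
      ((g.length : Int) - 1 - (k : Int)) ((pvLw g k : Int)) ((pvFe g k : Int))
    = pvVisAt g (pvFirstFail g fuel k) := by
  intro fuel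
  induction fuel with
  | zero => intro k _ _; rfl
  | succ fuel ih =>
    intro k hn hk
    simp only [pvLoopA]
    by_cases hg : ((k : Int) ≤ ((pvFe g k : Int)) ∧ ((g.length : Int) - 1 - (k : Int)) ≥ ((pvLw g k : Int)))
    · rw [if_pos hg]
      have hC : pvCb g k = true := by
        simp only [pvCb, Bool.and_eq_true, decide_eq_true_eq]
        obtain ⟨hg1, hg2⟩ := hg
        constructor <;> omega
      have hklt : k < g.length := by
        by_contra hc
        rw [pvCb_ge_false g k hn (by omega)] at hC
        simp at hC
      have hfold : ∀ i : Nat, g.getD i 0 = pvGi g i := fun _ => rfl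
      have hei : (g.length : Int) - 1 - (k : Int) = ((g.length - 1 - k : Nat) : Int) := by omega
      rw [hei]
      simp only [PySem.List.pyGetD_natCast, PySem.List.pySetD_natCast, hfold]
      rw [pvVisAt_step g k hn hklt]
      rw [show (if pvGi g k > pvTw g k then pvGi g k else pvTw g k) = pvTw g (k+1) from rfl]
      rw [show (if pvGi g (g.length - 1 - k) > pvTe g k then pvGi g (g.length - 1 - k)
        else pvTe g k) = pvTe g (k+1) from rfl]
      rw [show (if pvGi g k > pvTw g k then (k : Int) else ((pvLw g k : Int)))
        = ((pvLw g (k+1) : Int)) from by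
          rw [show pvLw g (k+1) = if pvGi g k > pvTw g k then k else pvLw g k from rfl,
            apply_ite (fun x : Nat => (x : Int))]]
      rw [show (if pvGi g (g.length - 1 - k) > pvTe g k then ((g.length - 1 - k : Nat) : Int)
        else ((pvFe g k : Int))) = ((pvFe g (k+1) : Int)) from by
          rw [show pvFe g (k+1) = if pvGi g (g.length - 1 - k) > pvTe g k then g.length - 1 - k
            else pvFe g k from rfl, apply_ite (fun x : Nat => (x : Int))]]
      rw [show ((k : Int) + 1) = (((k+1 : Nat)) : Int) from by omega]
      rw [show (((g.length - 1 - k : Nat) : Int) - 1) = ((g.length : Int) - 1 - (((k+1 : Nat)) : Int)) from by omega]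
      rw [show pvFirstFail g (fuel+1) k
        = if pvCb g k then pvFirstFail g fuel (k+1) else k from rfl, if_pos hC]
      exact ih (k+1) hn (by omega)
    · rw [if_neg hg]
      have hC : pvCb g k = false := by
        rw [← Bool.not_eq_true]
        intro h
        apply hg
        simp only [pvCb, Bool.and_eq_true, decide_eq_true_eq] at h
        constructor <;> omega
      rw [show pvFirstFail g (fuel+1) k
        = if pvCb g k then pvFirstFail g fuel (k+1) else k from rfl, if_neg (by simp [hC])]

lemma pvInit_eq (g : List Int) (hn : 1 ≤ g.length) :
    PySem.List.pySetD (PySem.List.pySetD ((List.range g.length).map (fun _ => false)) 0 true)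
      (-1) true = pvVisAt g 0 := by
  rw [show (0 : Int) = ((0 : Nat) : Int) from rfl, PySem.List.pySetD_natCast]
  have hne : ((List.range g.length).map (fun _ : Nat => false)).set 0 true ≠ [] := by
    have hlen : (((List.range g.length).map (fun _ : Nat => false)).set 0 true).length
        = g.length := by simp
    intro h
    rw [h] at hlen
    simp at hlen
    omega
  rw [pvSetD_neg_one _ _ hne]
  simp only [List.length_set, List.length_map, List.length_range]
  apply List.ext_getElem
  · simp [pvVisAt]
  · intro i h1 h2
    have hi : i < g.length := by simpa using h1
    simp only [List.getElem_set, List.getElem_map, List.getElem_range, pvVisAt, pvVisBit]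
    have hni : ¬ (g.length ≤ i) := by omega
    by_cases h0 : i = 0
    · simp [h0]
    · by_cases hl : i = g.length - 1
      · simp [hl]
      · simp [h0, hl, hni, show ¬(g.length - 1 = i) from fun h => hl h.symm,
          show ¬((0:Nat) = i) from fun h => h0 h.symm]

lemma pvA_eq (g : List Int) (hn : 1 ≤ g.length) :
    calc_visibility_row g = pvVisAt g (pvStop g) := by
  have hne : g ≠ [] := by
    intro h
    rw [h] at hn
    simp at hn
  have H := pvLoop_eval g (g.length + 1) 0 hn (by omega)
  simp only [Nat.cast_zero, sub_zero] at H
  rw [show pvLw g 0 = 0 from rfl, show pvFe g 0 = g.length - 1 from rfl] at H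
  simp only [Nat.cast_zero] at H
  rw [show ((g.length - 1 : Nat) : Int) = (g.length : Int) - 1 from by omega] at H
  simp only [calc_visibility_row]
  rw [pvInit_eq g hn]
  rw [show PySem.List.pyGetD g 0 0 = pvTw g 0 from by rw [PySem.List.pyGetD_zero]; rfl]
  rw [show PySem.List.pyGetD g (-1) 0 = pvTe g 0 from by
    rw [PySem.List.pyGetD_neg_one g 0 hne, List.getLast_eq_getElem]
    rw [show pvTe g 0 = pvGi g (g.length - 1) from rfl, pvGi,
      List.getD_eq_getElem g 0 (by omega)]]
  unfold pvStop
  exact H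

-- ===== record predicates vs running maxima =====

lemma pvTw_lt_iff (g : List Int) (x : Int) :
    ∀ i, 1 ≤ i → (pvTw g i < x ↔ ∀ j < i, pvGi g j < x) := by
  intro i
  induction i with
  | zero => intro h; exact absurd h (by omega)
  | succ i ih =>
    intro _
    rw [show pvTw g (i+1) = if pvGi g i > pvTw g i then pvGi g i else pvTw g i from rfl]
    rcases Nat.eq_zero_or_pos i with h0 | h0
    · subst h0
      rw [show pvTw g 0 = pvGi g 0 from rfl]
      constructor
      · intro hx j hj
        have hj0 : j = 0 := by omega
        subst hj0
        split_ifs at hx <;> omega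
      · intro h
        have := h 0 (by omega)
        split_ifs <;> omega
    · have H := ih h0
      constructor
      · intro hx j hj
        rcases (by omega : j = i ∨ j < i) with h | h
        · subst h; split_ifs at hx <;> omega
        · refine H.mp ?_ j h
          split_ifs at hx <;> omega
      · intro h
        have h2 : pvTw g i < x := H.mpr (fun j hj => h j (by omega))
        have h3 := h i (by omega)
        split_ifs <;> omega

-- running-max record predicates in index form (proof-side only)
def pvSeenW (g : List Int) (i : Nat) : Prop := ∀ j < i, g.getD j 0 < g.getD i 0
def pvSeenE (g : List Int) (i : Nat) : Prop := ∀ j < g.length, i < j → g.getD j 0 < g.getD i 0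

lemma pvW_iff (g : List Int) (i : Nat) (hi : i < g.length) : pvW g i ↔ pvSeenW g i := by
  unfold pvW pvSeenW
  constructor
  · intro h j hj
    have hjn : j < g.length := by omega
    have hjt : j < (g.take i).length := by simp; omega
    have hmem : g.getD j 0 ∈ g.take i := by
      have he : (g.take i)[j] = g[j] := List.getElem_take
      rw [List.getD_eq_getElem g 0 hjn, ← he]
      exact List.getElem_mem hjt
    have := h _ hmem
    rwa [List.getD_eq_getElem g 0 hjn] at this ⊢
  · intro h x hx
    obtain ⟨j, hj, hxe⟩ := List.getElem_of_mem hx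
    have hjn : j < g.length := by simp at hj; omega
    have hji : j < i := by simp at hj; omega
    have he : (g.take i)[j] = g[j] := List.getElem_take
    rw [← hxe, he, ← List.getD_eq_getElem g 0 hjn]
    exact h j hji

lemma pvE_iff (g : List Int) (i : Nat) (hi : i < g.length) : pvE g i ↔ pvSeenE g i := by
  unfold pvE pvSeenE
  constructor
  · intro h j hjn hij
    have hjt : j - (i+1) < (g.drop (i+1)).length := by simp; omega
    have hmem : g.getD j 0 ∈ g.drop (i+1) := by
      have he : (g.drop (i+1))[j - (i+1)] = g[(i+1) + (j - (i+1))] := List.getElem_drop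
      rw [List.getD_eq_getElem g 0 hjn]
      have hidx : (i+1) + (j - (i+1)) = j := by omega
      rw [show g[j] = g[(i+1) + (j - (i+1))]'(by omega) from by congr 1; omega, ← he]
      exact List.getElem_mem hjt
    exact h _ hmem
  · intro h x hx
    obtain ⟨j, hj, hxe⟩ := List.getElem_of_mem hx
    have hjn : (i+1) + j < g.length := by simp at hj; omega
    have he : (g.drop (i+1))[j] = g[(i+1) + j] := List.getElem_drop
    rw [← hxe, he, ← List.getD_eq_getElem g 0 hjn]
    exact h ((i+1) + j) hjn (by omega)

lemma pvWb_iff (g : List Int) (i : Nat) : pvWb g i = true ↔ pvSeenW g i := by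
  rcases Nat.eq_zero_or_pos i with h0 | h0
  · subst h0
    constructor
    · intro _ j hj
      exact absurd hj (by omega)
    · intro _
      simp [pvWb]
  · have H := pvTw_lt_iff g (pvGi g i) i h0
    simp only [pvWb, pvSeenW, Bool.or_eq_true, decide_eq_true_eq]
    constructor
    · rintro (h | h)
      · omega
      · exact H.mp h
    · intro h; exact Or.inr (H.mpr h)

lemma pvTe_lt_iff (g : List Int) (x : Int) :
    ∀ k, 1 ≤ k → k ≤ g.length - 1 →
      (pvTe g k < x ↔ ∀ j, g.length - k ≤ j → j < g.length → pvGi g j < x) := by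
  intro k
  induction k with
  | zero => intro h; exact absurd h (by omega)
  | succ k ih =>
    intro _ hk
    rcases Nat.eq_zero_or_pos k with h0 | h0
    · subst h0
      rw [show pvTe g 1 = if pvGi g (g.length - 1 - 0) > pvTe g 0
          then pvGi g (g.length - 1 - 0) else pvTe g 0 from rfl,
        show pvTe g 0 = pvGi g (g.length - 1) from rfl]
      simp only [Nat.sub_zero]
      rw [if_neg (lt_irrefl _)]
      constructor
      · intro h j hj1 hj2
        have hje : j = g.length - 1 := by omega
        subst hje; exact h
      · intro h; exact h (g.length - 1) (by omega) (by omega)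
    · have H := ih h0 (by omega)
      rw [show pvTe g (k+1) = if pvGi g (g.length - 1 - k) > pvTe g k
          then pvGi g (g.length - 1 - k) else pvTe g k from rfl]
      constructor
      · intro h j hj1 hj2
        rcases (by omega : j = g.length - 1 - k ∨ g.length - k ≤ j) with hj | hj
        · subst hj; split_ifs at h <;> omega
        · refine H.mp ?_ j hj hj2
          split_ifs at h <;> omega
      · intro h
        have h1 := h (g.length - 1 - k) (by omega) (by omega)
        have h2 : pvTe g k < x := H.mpr (fun j a b => h j (by omega) b)
        split_ifs <;> omega

lemma pvEb_iff (g : List Int) (i : Nat) (hi : i < g.length) :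
    pvEb g i = true ↔ pvSeenE g i := by
  by_cases hl : i = g.length - 1
  · constructor
    · intro _ j hj1 hj2
      exact absurd hj2 (by omega)
    · intro _
      simp [pvEb, hl]
  · have hk1 : 1 ≤ g.length - 1 - i := by omega
    have hk2 : g.length - 1 - i ≤ g.length - 1 := by omega
    have H := pvTe_lt_iff g (pvGi g i) (g.length - 1 - i) hk1 hk2
    simp only [pvEb, pvSeenE, Bool.or_eq_true, decide_eq_true_eq]
    constructor
    · rintro (h | h)
      · exact absurd h hl
      · exact fun j hj1 hj2 => H.mp h j (by omega) hj1
    · intro h; exact Or.inr (H.mpr (fun j hj1 hj2 => h j hj2 (by omega)))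

-- ===== the termination iteration of A's loop, characterised =====

lemma pvStop_argmin (g : List Int) (hn : 1 ≤ g.length) :
    ∃ k, k < g.length ∧ (pvWb g k || pvEb g k) = true ∧
      max (k + 1) (g.length - k) = pvStop g := by
  obtain ⟨k, hk, hrec, h1, h2⟩ :=
    (pvNotC_iff g (pvStop g) hn (pvStop_le g hn)).mp (pvStop_false g hn)
  refine ⟨k, hk, hrec, ?_⟩
  have hle : max (k + 1) (g.length - k) ≤ pvStop g := Nat.max_le.mpr ⟨h1, h2⟩
  rcases Nat.lt_or_ge (max (k + 1) (g.length - k)) (pvStop g) with h | h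
  · exfalso
    have hC := pvStop_min g _ h
    have hF : pvCb g (max (k + 1) (g.length - k)) = false :=
      (pvNotC_iff g _ hn (by omega)).mpr
        ⟨k, hk, hrec, Nat.le_max_left _ _, Nat.le_max_right _ _⟩
    rw [hC] at hF; simp at hF
  · exact le_antisymm hle h

lemma pvStop_le_of_rec (g : List Int) (hn : 1 ≤ g.length) (k : Nat) (hk : k < g.length)
    (hrec : (pvWb g k || pvEb g k) = true) :
    pvStop g ≤ max (k + 1) (g.length - k) := by
  by_contra hc
  have hC := pvStop_min g (max (k + 1) (g.length - k)) (by omega)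
  have hF : pvCb g (max (k + 1) (g.length - k)) = false :=
    (pvNotC_iff g _ hn (by omega)).mpr
      ⟨k, hk, hrec, Nat.le_max_left _ _, Nat.le_max_right _ _⟩
  rw [hC] at hF; simp at hF

-- ===== evaluating B =====

def pvNatBit (g : List Int) (i : Nat) : Bool :=
  decide (i = 0) || decide (i = g.length - 1) || pvWb g i || pvEb g i

-- vis after the west pass has processed indices 1..m
def pvWDBit (g : List Int) (m i : Nat) : Bool :=
  decide (i = 0) || decide (i = g.length - 1) ||
  (decide (1 ≤ i) && decide (i ≤ m) && decide (pvGi g i > pvTw g i))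
def pvWD (g : List Int) (m : Nat) : List Bool := (List.range g.length).map (pvWDBit g m)

-- vis after the east pass has processed indices n-2 down to n-1-t
def pvEDBit (g : List Int) (t i : Nat) : Bool :=
  pvWDBit g (g.length - 1) i ||
  (decide (g.length - 1 - t ≤ i) && decide (i + 1 ≤ g.length - 1) &&
    decide (pvGi g i > pvTe g (g.length - 1 - i)))
def pvED (g : List Int) (t : Nat) : List Bool := (List.range g.length).map (pvEDBit g t)

lemma pvTw_one (g : List Int) : pvTw g 1 = pvGi g 0 := by
  rw [show pvTw g 1 = if pvGi g 0 > pvTw g 0 then pvGi g 0 else pvTw g 0 from rfl,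
    show pvTw g 0 = pvGi g 0 from rfl, if_neg (lt_irrefl _)]

lemma pvTe_one (g : List Int) : pvTe g 1 = pvGi g (g.length - 1) := by
  rw [show pvTe g 1 = if pvGi g (g.length - 1 - 0) > pvTe g 0
      then pvGi g (g.length - 1 - 0) else pvTe g 0 from rfl,
    show pvTe g 0 = pvGi g (g.length - 1) from rfl]
  simp only [Nat.sub_zero]
  rw [if_neg (lt_irrefl _)]

lemma pvWD_set (g : List Int) (m : Nat) (hm : m + 1 ≤ g.length - 1)
    (hrec : pvGi g (m+1) > pvTw g (m+1)) :
    (pvWD g m).set (m+1) true = pvWD g (m+1) := by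
  apply List.ext_getElem
  · simp [pvWD]
  · intro i h1 h2
    have hi : i < g.length := by simpa [pvWD] using h2
    simp only [pvWD, List.getElem_set, List.getElem_map, List.getElem_range]
    by_cases hc : m + 1 = i
    · subst hc
      rw [if_pos rfl]
      simp [pvWDBit, hrec]
    · rw [if_neg hc]
      simp only [pvWDBit]
      have hd : decide (i ≤ m) = decide (i ≤ m + 1) := decide_eq_decide.mpr (by omega)
      rw [hd]

lemma pvWD_noset (g : List Int) (m : Nat) (hm : m + 1 ≤ g.length - 1)
    (hrec : ¬ pvGi g (m+1) > pvTw g (m+1)) :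
    pvWD g m = pvWD g (m+1) := by
  apply List.ext_getElem
  · simp [pvWD]
  · intro i h1 h2
    have hi : i < g.length := by simpa [pvWD] using h2
    simp only [pvWD, List.getElem_map, List.getElem_range, pvWDBit]
    by_cases hc : i = m + 1
    · subst hc
      simp [hrec]
    · have hd : decide (i ≤ m) = decide (i ≤ m + 1) := decide_eq_decide.mpr (by omega)
      rw [hd]

lemma pvWestFold (g : List Int) (hn : 1 ≤ g.length) :
    ∀ m, m ≤ g.length - 1 →
      (PySem.List.pyRange 1 (1 + (m : Int)) 1).foldl (pvStepW g) (pvWD g 0, pvTw g 1)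
        = (pvWD g m, pvTw g (m+1)) := by
  intro m
  induction m with
  | zero =>
    intro _
    rw [show (1 + ((0:Nat) : Int)) = 1 from by norm_num,
      PySem.List.pyRange_one_eq_nil (by omega)]
    rfl
  | succ m ih =>
    intro hm
    rw [show (1 + ((m+1:Nat) : Int)) = (1 + (m : Int)) + 1 from by push_cast; ring,
      PySem.List.pyRange_one_succ_right (by omega), List.foldl_append, ih (by omega)]
    simp only [List.foldl_cons, List.foldl_nil, pvStepW]
    rw [show (1 + (m : Int)) = ((m+1 : Nat) : Int) from by push_cast; ring]
    simp only [PySem.List.pyGetD_natCast, PySem.List.pySetD_natCast]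
    have hg : g.getD (m+1) 0 = pvGi g (m+1) := rfl
    rw [hg]
    by_cases hc : pvGi g (m+1) > pvTw g (m+1)
    · rw [if_pos hc]
      rw [pvWD_set g m hm hc]
      rw [show pvTw g (m+2) = if pvGi g (m+1) > pvTw g (m+1) then pvGi g (m+1)
        else pvTw g (m+1) from rfl, if_pos hc]
    · rw [if_neg hc]
      rw [pvWD_noset g m hm hc]
      rw [show pvTw g (m+2) = if pvGi g (m+1) > pvTw g (m+1) then pvGi g (m+1)
        else pvTw g (m+1) from rfl, if_neg hc]

lemma pvED_set (g : List Int) (t : Nat) (ht : t + 1 ≤ g.length - 1)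
    (hrec : pvGi g (g.length - 2 - t) > pvTe g (t+1)) :
    (pvED g t).set (g.length - 2 - t) true = pvED g (t+1) := by
  have he : g.length - 1 - (g.length - 2 - t) = t + 1 := by omega
  apply List.ext_getElem
  · simp [pvED]
  · intro i h1 h2
    have hi : i < g.length := by simpa [pvED] using h2
    simp only [pvED, List.getElem_set, List.getElem_map, List.getElem_range]
    by_cases hc : g.length - 2 - t = i
    · subst hc
      rw [if_pos rfl]
      simp only [pvEDBit, he]
      simp [hrec, show g.length - 1 - (t+1) ≤ g.length - 2 - t from by omega,
        show g.length - 2 - t + 1 ≤ g.length - 1 from by omega]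
    · rw [if_neg hc]
      simp only [pvEDBit]
      have hd : decide (g.length - 1 - t ≤ i) = decide (g.length - 1 - (t+1) ≤ i) :=
        decide_eq_decide.mpr (by omega)
      rw [hd]

lemma pvED_noset (g : List Int) (t : Nat) (ht : t + 1 ≤ g.length - 1)
    (hrec : ¬ pvGi g (g.length - 2 - t) > pvTe g (t+1)) :
    pvED g t = pvED g (t+1) := by
  have he : g.length - 1 - (g.length - 2 - t) = t + 1 := by omega
  apply List.ext_getElem
  · simp [pvED]
  · intro i h1 h2
    have hi : i < g.length := by simpa [pvED] using h2
    simp only [pvED, List.getElem_map, List.getElem_range, pvEDBit]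
    by_cases hc : i = g.length - 2 - t
    · subst hc
      rw [he]
      simp [hrec, show ¬ (g.length - 1 - t ≤ g.length - 2 - t) from by omega]
    · have hd : decide (g.length - 1 - t ≤ i) = decide (g.length - 1 - (t+1) ≤ i) :=
        decide_eq_decide.mpr (by omega)
      rw [hd]

lemma pvEastFold (g : List Int) (hn : 1 ≤ g.length) :
    ∀ t, t ≤ g.length - 1 →
      ((List.range t).map (fun k : Nat => ((g.length : Int) - 2 - (k : Int)))).foldl (pvStepE g)
        (pvED g 0, pvTe g 1) = (pvED g t, pvTe g (t+1)) := by
  intro t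
  induction t with
  | zero => intro _; rfl
  | succ t ih =>
    intro ht
    rw [List.range_succ, List.map_append, List.foldl_append, ih (by omega)]
    simp only [List.map_cons, List.map_nil, List.foldl_cons, List.foldl_nil, pvStepE]
    have hcast : ((g.length : Int) - 2 - (t : Int)) = ((g.length - 2 - t : Nat) : Int) := by
      omega
    rw [hcast]
    simp only [PySem.List.pyGetD_natCast, PySem.List.pySetD_natCast]
    have hg : g.getD (g.length - 2 - t) 0 = pvGi g (g.length - 2 - t) := rfl
    rw [hg]
    have he : g.length - 1 - (t + 1) = g.length - 2 - t := by omega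
    by_cases hc : pvGi g (g.length - 2 - t) > pvTe g (t+1)
    · rw [if_pos hc]
      rw [pvED_set g t ht hc]
      rw [show pvTe g (t+2) = if pvGi g (g.length - 1 - (t+1)) > pvTe g (t+1)
        then pvGi g (g.length - 1 - (t+1)) else pvTe g (t+1) from rfl, he, if_pos hc]
    · rw [if_neg hc]
      rw [pvED_noset g t ht hc]
      rw [show pvTe g (t+2) = if pvGi g (g.length - 1 - (t+1)) > pvTe g (t+1)
        then pvGi g (g.length - 1 - (t+1)) else pvTe g (t+1) from rfl, he, if_neg hc]

lemma pvWD_zero (g : List Int) : pvVisAt g 0 = pvWD g 0 := by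
  apply List.map_congr_left
  intro i hi
  have hin : i < g.length := List.mem_range.mp hi
  rw [Bool.eq_iff_iff]
  simp only [pvVisBit, pvWDBit, Bool.or_eq_true, Bool.and_eq_true, decide_eq_true_eq]
  constructor
  · rintro (((h | h) | ⟨_, h2⟩) | ⟨_, h2⟩)
    · exact Or.inl (Or.inl h)
    · exact Or.inl (Or.inr h)
    · omega
    · omega
  · rintro ((h | h) | ⟨⟨h1, h2⟩, _⟩)
    · exact Or.inl (Or.inl (Or.inl h))
    · exact Or.inl (Or.inl (Or.inr h))
    · omega

lemma pvED_zero (g : List Int) : pvWD g (g.length - 1) = pvED g 0 := by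
  apply List.map_congr_left
  intro i hi
  rw [Bool.eq_iff_iff]
  simp only [pvEDBit, Bool.or_eq_true, Bool.and_eq_true, decide_eq_true_eq]
  constructor
  · intro h; exact Or.inl h
  · rintro (h | ⟨⟨h1, h2⟩, _⟩)
    · exact h
    · omega

lemma pvED_final (g : List Int) : pvED g (g.length - 1) = (List.range g.length).map (pvNatBit g) := by
  apply List.map_congr_left
  intro i hi
  have hin : i < g.length := List.mem_range.mp hi
  rw [Bool.eq_iff_iff]
  simp only [pvEDBit, pvWDBit, pvNatBit, pvWb, pvEb, Bool.or_eq_true, Bool.and_eq_true,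
    decide_eq_true_eq]
  constructor
  · rintro ((h | h) | ⟨⟨h1, h2⟩, h3⟩)
    · rcases h with h | h
      · exact Or.inl (Or.inl (Or.inl h))
      · exact Or.inl (Or.inl (Or.inr h))
    · exact Or.inl (Or.inr (Or.inr h.2))
    · exact Or.inr (Or.inr h3)
  · rintro (((h | h) | h) | h)
    · exact Or.inl (Or.inl (Or.inl h))
    · exact Or.inl (Or.inl (Or.inr h))
    · rcases h with h | h
      · exact Or.inl (Or.inl (Or.inl h))
      · by_cases h0 : i = 0
        · exact Or.inl (Or.inl (Or.inl h0))
        · exact Or.inl (Or.inr ⟨⟨by omega, by omega⟩, h⟩)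
    · rcases h with h | h
      · exact Or.inl (Or.inl (Or.inr h))
      · by_cases hl : i = g.length - 1
        · exact Or.inl (Or.inl (Or.inr hl))
        · exact Or.inr ⟨⟨by omega, by omega⟩, h⟩

lemma pvB_eq (g : List Int) (hn : 1 ≤ g.length) :
    calc_visibility_row_alt g = (List.range g.length).map (pvNatBit g) := by
  have hne : g ≠ [] := by
    intro h; rw [h] at hn; simp at hn
  simp only [calc_visibility_row_alt]
  rw [show (List.replicate g.length false) = (List.range g.length).map (fun _ => false) from by
    rw [List.map_const']; simp]
  rw [pvInit_eq g hn, pvWD_zero g]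
  rw [show PySem.List.pyGetD g 0 0 = pvTw g 1 from by
    rw [PySem.List.pyGetD_zero, pvTw_one]; rfl]
  rw [show (g.length : Int) = 1 + ((g.length - 1 : Nat) : Int) from by omega]
  rw [pvWestFold g hn (g.length - 1) le_rfl]
  rw [show PySem.List.pyGetD g (-1) 0 = pvTe g 1 from by
    rw [PySem.List.pyGetD_neg_one g 0 hne, List.getLast_eq_getElem, pvTe_one, pvGi,
      List.getD_eq_getElem g 0 (by omega)]]
  rw [show (1 + ((g.length - 1 : Nat) : Int) - 2) = ((g.length : Int) - 2) from by omega]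
  rw [show PySem.List.pyRange ((g.length : Int) - 2) (-1) (-1)
      = (List.range (g.length - 1)).map (fun k : Nat => ((g.length : Int) - 2 - (k : Int))) from by
    rw [PySem.List.pyRange_neg_one,
      show ((g.length : Int) - 2 - (-1)).toNat = g.length - 1 from by omega]]
  rw [pvED_zero g, pvEastFold g hn (g.length - 1) le_rfl]
  exact pvED_final g

-- ===== VERDICT (by name: the statement is the Claim_ definition above) =====
-- the record below (above) a west (east) record is itself a west (east) record
lemma pvSide_west (g : List Int) (i k : Nat) (hk : k < i) (hi : i < g.length)
    (hW : pvSeenW g i) (hrec : (pvWb g k || pvEb g k) = true) : pvWb g k = true := by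
  rcases Bool.or_eq_true _ _ |>.mp hrec with h | h
  · exact h
  · exfalso
    have h1 := ((pvEb_iff g k (by omega)).mp h) i hi (by omega)
    have h2 := hW k hk
    omega

lemma pvSide_east (g : List Int) (i k : Nat) (hk : i < k) (hkn : k < g.length)
    (hE : pvSeenE g i) (hrec : (pvWb g k || pvEb g k) = true) : pvEb g k = true := by
  rcases Bool.or_eq_true _ _ |>.mp hrec with h | h
  · exfalso
    have h1 := ((pvWb_iff g k).mp h) i hk
    have h2 := hE k hkn (by omega)
    omega
  · exact h

-- an unmarked interior record yields a D_ witness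
lemma pvMiss_D (g : List Int) (hn : 1 ≤ g.length) (i : Nat) (hin : i < g.length)
    (h0 : i ≠ 0) (hl : i ≠ g.length - 1)
    (hrec : (pvWb g i || pvEb g i) = true)
    (hm : ¬ ((pvWb g i = true ∧ i < pvStop g) ∨
      (pvEb g i = true ∧ g.length - pvStop g ≤ i))) :
    D_calc_visibility_row g := by
  have hstop2 := pvStop_le g hn
  obtain ⟨k0, hk0n, hk0rec, hk0eq⟩ := pvStop_argmin g hn
  have hk1 : k0 + 1 ≤ pvStop g := hk0eq ▸ Nat.le_max_left _ _
  have hk2 : g.length - k0 ≤ pvStop g := hk0eq ▸ Nat.le_max_right _ _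
  refine ⟨i, hin, ?_, ?_, ?_⟩
  · rcases Bool.or_eq_true _ _ |>.mp hrec with h | h
    · exact Or.inl ((pvW_iff g i hin).mpr ((pvWb_iff g i).mp h))
    · exact Or.inr ((pvE_iff g i hin).mpr ((pvEb_iff g i hin).mp h))
  · intro hWi
    have hSi := (pvW_iff g i hin).mp hWi
    have hwb : pvWb g i = true := (pvWb_iff g i).mpr hSi
    have hsi : pvStop g ≤ i := by
      by_contra hc
      exact hm (Or.inl ⟨hwb, by omega⟩)
    have hk0i : k0 < i := by omega
    have hk0w : pvWb g k0 = true := pvSide_west g i k0 hk0i hin hSi hk0rec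
    exact ⟨k0, hk0i, (pvW_iff g k0 hk0n).mpr ((pvWb_iff g k0).mp hk0w), by omega⟩
  · intro hEi
    have hSi := (pvE_iff g i hin).mp hEi
    have heb : pvEb g i = true := (pvEb_iff g i hin).mpr hSi
    have hse : pvStop g ≤ g.length - 1 - i := by
      by_contra hc
      exact hm (Or.inr ⟨heb, by omega⟩)
    have hk0i : i < k0 := by omega
    have hk0e : pvEb g k0 = true := pvSide_east g i k0 hk0i hk0n hSi hk0rec
    exact ⟨k0, by omega, (pvE_iff g k0 hk0n).mpr ((pvEb_iff g k0 hk0n).mp hk0e), hk0i⟩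

-- a D_ witness is an interior index
lemma pvD_interior (g : List Int) (i : Nat) (hin : i < g.length)
    (hbody : (pvW g i ∨ pvE g i) ∧
      (pvW g i → ∃ k < i, pvW g k ∧ g.length - i ≤ k) ∧
      (pvE g i → ∃ k < g.length - 1 - i, pvE g k ∧ i < k)) :
    i ≠ 0 ∧ i ≠ g.length - 1 := by
  obtain ⟨_, hW, hE⟩ := hbody
  constructor
  · intro h0
    subst h0
    obtain ⟨k, hk, -⟩ := hW (by intro x hx; simp at hx)
    omega
  · intro hl
    obtain ⟨k, hk, -⟩ := hE (by
      intro x hx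
      rw [List.drop_eq_nil_of_le (by omega)] at hx
      simp at hx)
    omega

theorem calc_visibility_row_spec : Claim_unchanged_calc_visibility_row := by
  intro g _ hpre hnd
  have hn : 1 ≤ g.length := List.length_pos_iff.mpr hpre
  show calc_visibility_row g = calc_visibility_row_alt g
  rw [pvA_eq g hn, pvB_eq g hn]
  apply List.map_congr_left
  intro i hi
  have hin : i < g.length := List.mem_range.mp hi
  have hstop2 := pvStop_le g hn
  rw [Bool.eq_iff_iff]
  simp only [pvVisBit, pvNatBit, Bool.or_eq_true, Bool.and_eq_true, decide_eq_true_eq]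
  constructor
  · rintro (((h | h) | ⟨hw, _⟩) | ⟨he, _⟩)
    · exact Or.inl (Or.inl (Or.inl h))
    · exact Or.inl (Or.inl (Or.inr h))
    · exact Or.inl (Or.inr hw)
    · exact Or.inr he
  · intro hB
    by_cases h0 : i = 0
    · exact Or.inl (Or.inl (Or.inl h0))
    · by_cases hl : i = g.length - 1
      · exact Or.inl (Or.inl (Or.inr hl))
      · have hrec : (pvWb g i || pvEb g i) = true := by
          rcases hB with ((h | h) | h) | h
          · exact absurd h h0
          · exact absurd h hl
          · simp [h]
          · simp [h]
        by_cases hm : (pvWb g i = true ∧ i < pvStop g) ∨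
            (pvEb g i = true ∧ g.length - pvStop g ≤ i)
        · rcases hm with ⟨hw', hlt⟩ | ⟨he', hge⟩
          · exact Or.inl (Or.inr ⟨hw', by omega, by omega⟩)
          · exact Or.inr ⟨he', by omega, by omega⟩
        · exact absurd (pvMiss_D g hn i hin h0 hl hrec hm) hnd

theorem calc_visibility_row_changed : Claim_changed_calc_visibility_row := by
  unfold Claim_changed_calc_visibility_row; decide

theorem calc_visibility_row_tight : Claim_exact_calc_visibility_row := by
  intro g _ hpre hD heq
  have hn : 1 ≤ g.length := List.length_pos_iff.mpr hpre
  obtain ⟨i, hin, hbody⟩ := hD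
  obtain ⟨h0, hl⟩ := pvD_interior g i hin hbody
  obtain ⟨hreci, hWimp, hEimp⟩ := hbody
  rw [pvA_eq g hn, pvB_eq g hn] at heq
  have hbit : pvVisBit g (pvStop g) i = pvNatBit g i := by
    have hb := congrArg (fun l => l.getD i false) heq
    simpa [pvVisAt, List.getD_eq_getElem?_getD, List.getElem?_map, List.getElem?_range,
      hin] using hb
  have hNat : pvNatBit g i = true := by
    simp only [pvNatBit, Bool.or_eq_true]
    rcases hreci with h | h
    · exact Or.inl (Or.inr ((pvWb_iff g i).mpr ((pvW_iff g i hin).mp h)))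
    · exact Or.inr ((pvEb_iff g i hin).mpr ((pvE_iff g i hin).mp h))
  have hVis : ¬ (pvVisBit g (pvStop g) i = true) := by
    simp only [pvVisBit, Bool.or_eq_true, Bool.and_eq_true, decide_eq_true_eq]
    rintro (((h | h) | ⟨hw, h1, h2⟩) | ⟨he, h1, h2⟩)
    · exact h0 h
    · exact hl h
    · obtain ⟨k, hki, hWk, hwin⟩ := hWimp ((pvW_iff g i hin).mpr ((pvWb_iff g i).mp hw))
      have hkn : k < g.length := by omega
      have hkrec : (pvWb g k || pvEb g k) = true := by
        simp [(pvWb_iff g k).mpr ((pvW_iff g k hkn).mp hWk)]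
      have hle := pvStop_le_of_rec g hn k hkn hkrec
      have hmx : max (k + 1) (g.length - k) ≤ i := Nat.max_le.mpr ⟨by omega, by omega⟩
      omega
    · obtain ⟨k, hki, hEk, hwin⟩ := hEimp ((pvE_iff g i hin).mpr ((pvEb_iff g i hin).mp he))
      have hkn : k < g.length := by omega
      have hkrec : (pvWb g k || pvEb g k) = true := by
        simp [(pvEb_iff g k hkn).mpr ((pvE_iff g k hkn).mp hEk)]
      have hle := pvStop_le_of_rec g hn k hkn hkrec
      have hmx : max (k + 1) (g.length - k) ≤ g.length - 1 - i :=
        Nat.max_le.mpr ⟨by omega, by omega⟩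
      have hstop2 := pvStop_le g hn
      omega
  rw [hNat] at hbit
  exact hVis hbit
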